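-- pv_equiv track=rewrite | github.com/paulklemstine/factor | lean/demo/Pythagorean/five_directions_demo.py | pythagorean_quadruples
-- ===== SOURCE A (Python) =====
-- import math
--
-- def pythagorean_quadruples(N=50):
--     """Find all Pythagorean quadruples with d ≤ N."""
--     quads = []
--     for d in range(1, N+1):
--         for a in range(1, d):
--             for b in range(a, d):
--                 c_sq = d*d - a*a - b*b
--                 if c_sq > 0:
--                     c = int(math.isqrt(c_sq))
--                     if c*c == c_sq and c >= b:
--                         quads.append((a, b, c, d))
--     return quads
-- ===== SOURCE B (Python) =====
-- def pythagorean_quadruples(N=50):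
--     """Find all Pythagorean quadruples with d <= N (hash of two-square sums)."""
--     pairs = {}
--     for b in range(1, N):
--         for c in range(b, N):
--             pairs.setdefault(b*b + c*c, []).append((b, c))
--     quads = []
--     for d in range(1, N+1):
--         dd = d*d
--         for a in range(1, d):
--             for (b, c) in pairs.get(dd - a*a, []):
--                 if b >= a:
--                     quads.append((a, b, c, d))
--     return quads
-- ===== Notes on version B (the rewrite author's own statement) =====
-- stated objective: faster
-- what changed: B precomputes one hash map from two-square sums b*b+c*c to their (b,c) pairs, then answers each (d,a) with a single lookup of d*d-a*a, eliminating A's innermost b-loop with its per-b isqrt test.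
import Mathlib
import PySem

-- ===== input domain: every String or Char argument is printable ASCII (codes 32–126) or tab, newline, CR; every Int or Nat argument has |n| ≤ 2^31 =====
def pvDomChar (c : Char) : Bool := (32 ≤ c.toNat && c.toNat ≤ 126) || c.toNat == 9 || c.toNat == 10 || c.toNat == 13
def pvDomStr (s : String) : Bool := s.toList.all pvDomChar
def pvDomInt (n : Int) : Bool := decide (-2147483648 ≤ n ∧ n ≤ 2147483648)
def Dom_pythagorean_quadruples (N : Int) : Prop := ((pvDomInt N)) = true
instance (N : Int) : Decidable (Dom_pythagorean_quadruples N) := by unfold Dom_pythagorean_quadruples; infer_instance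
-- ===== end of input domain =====

-- B replaces A's innermost b-loop (with a per-b integer-square-root test) by one lookup in a
-- precomputed map from two-square sums b*b+c*c to their (b, c) pairs; objective: faster.


-- ===== PORT A =====
-- math.isqrt, exact for 0 ≤ n (A only calls it with c_sq > 0)
def pyIsqrt (n : Int) : Int := (Nat.sqrt n.toNat : Int)

def pythagorean_quadruples (N : Int) : List (List Int) :=
  (PySem.List.pyRange 1 (N+1) 1).foldl (fun quads d =>
    (PySem.List.pyRange 1 d 1).foldl (fun quads a =>
      (PySem.List.pyRange a d 1).foldl (fun quads b =>
        let c_sq := d*d - a*a - b*b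
        if c_sq > 0 then
          let c : Int := pyIsqrt c_sq
          if c*c = c_sq ∧ c ≥ b then quads ++ [[a, b, c, d]] else quads
        else quads) quads) quads) []

-- ===== PORT B =====
-- pairs.setdefault(b*b + c*c, []).append((b, c))  is  modify (b*b+c*c) [] (· ++ [(b, c)])
def pqPairs (N : Int) : PySem.Dict Int (List (Int × Int)) :=
  (PySem.List.pyRange 1 N 1).foldl (fun ps b =>
    (PySem.List.pyRange b N 1).foldl (fun ps c =>
      ps.modify (b*b + c*c) [] (· ++ [(b, c)])) ps) PySem.Dict.empty

def pythagorean_quadruples_alt (N : Int) : List (List Int) :=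
  let pairs := pqPairs N
  (PySem.List.pyRange 1 (N+1) 1).foldl (fun quads d =>
    (PySem.List.pyRange 1 d 1).foldl (fun quads a =>
      (pairs.getD (d*d - a*a) []).foldl (fun quads p =>
        if p.1 ≥ a then quads ++ [[a, p.1, p.2, d]] else quads) quads) quads) []

-- ===== PRECONDITION & SPEC =====
def Spec_pythagorean_quadruples (N : Int) (out : List (List Int)) : Prop := out = pythagorean_quadruples_alt N
instance (N : Int) (out : List (List Int)) : Decidable (Spec_pythagorean_quadruples N out) := by unfold Spec_pythagorean_quadruples; infer_instance

-- ===== CLAIM (what is proved, stated in full; the proofs are below) =====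
def Claim_equal_pythagorean_quadruples : Prop := ∀ (N : Int), Dom_pythagorean_quadruples N → Spec_pythagorean_quadruples N (pythagorean_quadruples N)

-- ===== LEMMAS AND PROOFS =====

-- A's innermost test, as a Bool predicate on b (for fixed d, a)
def pqTestA (d a b : Int) : Bool :=
  decide (0 < d*d - a*a - b*b ∧
    pyIsqrt (d*d - a*a - b*b) * pyIsqrt (d*d - a*a - b*b) = d*d - a*a - b*b ∧
    pyIsqrt (d*d - a*a - b*b) ≥ b)

-- the flattened list of (sum, (b, c)) insertions B's build loop performs, in order
def pqAllPairs (N : Int) : List (Int × (Int × Int)) :=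
  (PySem.List.pyRange 1 N 1).flatMap (fun b =>
    (PySem.List.pyRange b N 1).map (fun c => (b*b + c*c, (b, c))))

-- for 0 ≤ c, the square root of a square is unique
lemma pq_isqrt_of_sq {c t : Int} (hc : 0 ≤ c) (h : c * c = t) : pyIsqrt t = c := by
  subst h
  unfold pyIsqrt
  obtain ⟨m, rfl⟩ := Int.eq_ofNat_of_zero_le hc
  have : ((m : Int) * m).toNat = m * m := by exact_mod_cast Int.toNat_natCast (m*m)
  rw [this, ← pow_two, Nat.sqrt_eq']

-- A as a nested flatMap of filtered ranges
lemma pqA_eq (N : Int) : pythagorean_quadruples N =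
    (PySem.List.pyRange 1 (N+1) 1).flatMap (fun d =>
      (PySem.List.pyRange 1 d 1).flatMap (fun a =>
        ((PySem.List.pyRange a d 1).filter (pqTestA d a)).map
          (fun b => [a, b, pyIsqrt (d*d - a*a - b*b), d]))) := by
  unfold pythagorean_quadruples
  have hinner : ∀ (d a : Int) (quads : List (List Int)),
      (PySem.List.pyRange a d 1).foldl (fun quads b =>
        let c_sq := d*d - a*a - b*b
        if c_sq > 0 then
          let c : Int := pyIsqrt c_sq
          if c*c = c_sq ∧ c ≥ b then quads ++ [[a, b, c, d]] else quads
        else quads) quads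
      = quads ++ ((PySem.List.pyRange a d 1).filter (pqTestA d a)).map
          (fun b => [a, b, pyIsqrt (d*d - a*a - b*b), d]) := by
    intro d a quads
    rw [show (fun (quads : List (List Int)) (b : Int) =>
        let c_sq := d*d - a*a - b*b
        if c_sq > 0 then
          let c : Int := pyIsqrt c_sq
          if c*c = c_sq ∧ c ≥ b then quads ++ [[a, b, c, d]] else quads
        else quads)
      = (fun (quads : List (List Int)) (b : Int) =>
        if pqTestA d a b then quads ++ [[a, b, pyIsqrt (d*d - a*a - b*b), d]] else quads) from ?_]
    · exact PySem.List.foldl_append_if _ _ _ _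
    · funext acc b
      simp only [pqTestA, decide_eq_true_eq]
      split_ifs <;> tauto
  have hmid : ∀ (d : Int) (quads : List (List Int)),
      (PySem.List.pyRange 1 d 1).foldl (fun quads a =>
        quads ++ ((PySem.List.pyRange a d 1).filter (pqTestA d a)).map
          (fun b => [a, b, pyIsqrt (d*d - a*a - b*b), d])) quads
      = quads ++ (PySem.List.pyRange 1 d 1).flatMap (fun a =>
          ((PySem.List.pyRange a d 1).filter (pqTestA d a)).map
            (fun b => [a, b, pyIsqrt (d*d - a*a - b*b), d])) := by
    intro d quads
    exact PySem.List.foldl_append_eq_flatMap _ _ _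
  simp only [hinner, hmid]
  exact (PySem.List.foldl_append_eq_flatMap _ _ _).trans (List.nil_append _)

-- B as a nested flatMap over the dict lookups
lemma pqB_eq (N : Int) : pythagorean_quadruples_alt N =
    (PySem.List.pyRange 1 (N+1) 1).flatMap (fun d =>
      (PySem.List.pyRange 1 d 1).flatMap (fun a =>
        (((pqPairs N).getD (d*d - a*a) []).filter (fun p => a ≤ p.1)).map
          (fun p => [a, p.1, p.2, d]))) := by
  unfold pythagorean_quadruples_alt
  have hinner : ∀ (d a : Int) (quads : List (List Int)),
      (((pqPairs N).getD (d*d - a*a) []).foldl (fun quads p =>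
        if p.1 ≥ a then quads ++ [[a, p.1, p.2, d]] else quads) quads)
      = quads ++ (((pqPairs N).getD (d*d - a*a) []).filter (fun p => a ≤ p.1)).map
          (fun p => [a, p.1, p.2, d]) := by
    intro d a quads
    rw [show (fun (quads : List (List Int)) (p : Int × Int) =>
        if p.1 ≥ a then quads ++ [[a, p.1, p.2, d]] else quads)
      = (fun (quads : List (List Int)) (p : Int × Int) =>
        if (fun (p : Int × Int) => decide (a ≤ p.1)) p then quads ++ [[a, p.1, p.2, d]] else quads) from ?_]
    · exact PySem.List.foldl_append_if _ _ _ _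
    · funext acc p
      simp [ge_iff_le]
  have hmid : ∀ (d : Int) (quads : List (List Int)),
      (PySem.List.pyRange 1 d 1).foldl (fun quads a =>
        quads ++ (((pqPairs N).getD (d*d - a*a) []).filter (fun p => a ≤ p.1)).map
          (fun p => [a, p.1, p.2, d])) quads
      = quads ++ (PySem.List.pyRange 1 d 1).flatMap (fun a =>
          (((pqPairs N).getD (d*d - a*a) []).filter (fun p => a ≤ p.1)).map
            (fun p => [a, p.1, p.2, d])) := by
    intro d quads
    exact PySem.List.foldl_append_eq_flatMap _ _ _
  simp only [hinner, hmid]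
  exact (PySem.List.foldl_append_eq_flatMap _ _ _).trans (List.nil_append _)

-- the dict lookup is the (ordered) list of pairs with the given sum
lemma pq_lookup (N s : Int) : (pqPairs N).getD s [] =
    ((pqAllPairs N).filter (fun p => p.1 == s)).map (·.2) := by
  have hbuild : pqPairs N =
      (pqAllPairs N).foldl (fun d p => d.modify p.1 [] (· ++ [p.2])) PySem.Dict.empty := by
    unfold pqPairs pqAllPairs
    rw [List.foldl_flatMap]
    simp [List.foldl_map]
  rw [hbuild, PySem.Dict.getD_foldl_modify_append]
  simp [PySem.Dict.getD_empty]

-- the pairs with sum s and first component b form (at most) a singleton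
lemma pq_sing (N s b : Int) (hb : 0 ≤ b) :
    ((PySem.List.pyRange b N 1).filter (fun c => b*b + c*c == s)).map (fun c => (b, c)) =
    (if b ≤ pyIsqrt (s - b*b) ∧ pyIsqrt (s - b*b) < N ∧
        pyIsqrt (s - b*b) * pyIsqrt (s - b*b) = s - b*b
     then [(b, pyIsqrt (s - b*b))] else []) := by
  set r := pyIsqrt (s - b*b) with hr
  by_cases hcond : b ≤ r ∧ r < N ∧ r * r = s - b*b
  · rw [if_pos hcond]
    have hmemr : r ∈ PySem.List.pyRange b N 1 :=
      PySem.List.mem_pyRange_one.mpr ⟨hcond.1, hcond.2.1⟩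
    have hpred : ∀ c ∈ PySem.List.pyRange b N 1, ((b*b + c*c == s) = (c == r)) := by
      intro c hc
      rw [PySem.List.mem_pyRange_one] at hc
      have hc0 : 0 ≤ c := le_trans hb hc.1
      rw [Bool.eq_iff_iff]
      simp only [beq_iff_eq]
      constructor
      · intro h
        exact (pq_isqrt_of_sq hc0 (by omega)).symm
      · intro h
        subst h
        omega
    rw [List.filter_congr hpred, List.filter_beq,
        List.count_eq_one_of_mem (PySem.List.nodup_pyRange_one _ _) hmemr]
    simp
  · rw [if_neg hcond]
    have : (PySem.List.pyRange b N 1).filter (fun c => b*b + c*c == s) = [] := by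
      rw [List.filter_eq_nil_iff]
      intro c hc h
      rw [PySem.List.mem_pyRange_one] at hc
      have hc0 : 0 ≤ c := le_trans hb hc.1
      rw [beq_iff_eq] at h
      have hcr : r = c := pq_isqrt_of_sq hc0 (by omega)
      exact hcond ⟨by omega, by omega, by rw [hcr]; omega⟩
    rw [this]
    rfl

-- a filtered-mapped list as a flatMap of conditional singletons
lemma pq_filter_map_eq_flatMap {α β : Type} (l : List α) (p : α → Bool) (f : α → β) :
    (l.filter p).map f = l.flatMap (fun x => if p x then [f x] else []) := by
  induction l with
  | nil => rfl
  | cons x xs ih => by_cases h : p x <;> simp [h, ih]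

-- the key pointwise identity: B's lookup-and-filter equals A's inner scan (as (b, c) pairs)
lemma pq_key (N d a : Int) (ha : 1 ≤ a) (had : a < d) (hd : d ≤ N) :
    ((pqPairs N).getD (d*d - a*a) []).filter (fun p => a ≤ p.1) =
    ((PySem.List.pyRange a d 1).filter (pqTestA d a)).map
      (fun b => (b, pyIsqrt (d*d - a*a - b*b))) := by
  rw [pq_lookup]
  unfold pqAllPairs
  rw [List.filter_flatMap, List.map_flatMap, List.filter_flatMap]
  rw [pq_filter_map_eq_flatMap]
  have hsplit1 : PySem.List.pyRange 1 N 1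
      = PySem.List.pyRange 1 a 1 ++ PySem.List.pyRange a N 1 :=
    PySem.List.pyRange_one_append 1 a N ha (by omega)
  have hsplit2 : PySem.List.pyRange a N 1
      = PySem.List.pyRange a d 1 ++ PySem.List.pyRange d N 1 :=
    PySem.List.pyRange_one_append a d N (by omega) hd
  rw [hsplit1, hsplit2, List.flatMap_append, List.flatMap_append]
  have hpiece : ∀ (b : Int), 0 ≤ b →
      ((((PySem.List.pyRange b N 1).map (fun c => (b*b + c*c, (b, c)))).filter
          (fun p => p.1 == d*d - a*a)).map (·.2)).filter (fun p => a ≤ p.1)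
      = (if a ≤ b ∧ b ≤ pyIsqrt (d*d - a*a - b*b) ∧ pyIsqrt (d*d - a*a - b*b) < N ∧
            pyIsqrt (d*d - a*a - b*b) * pyIsqrt (d*d - a*a - b*b) = d*d - a*a - b*b
         then [(b, pyIsqrt (d*d - a*a - b*b))] else []) := by
    intro b hb0
    have e1 : ((PySem.List.pyRange b N 1).map (fun c => (b*b + c*c, (b, c)))).filter
          (fun p => p.1 == d*d - a*a)
        = ((PySem.List.pyRange b N 1).filter (fun c => b*b + c*c == d*d - a*a)).map
          (fun c => (b*b + c*c, (b, c))) := by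
      rw [List.filter_map]
      rfl
    rw [e1, List.map_map]
    have e2 : (((fun p : Int × (Int × Int) => p.2)) ∘ (fun c : Int => (b*b + c*c, (b, c))))
        = (fun c : Int => (b, c)) := rfl
    rw [e2, pq_sing N (d*d - a*a) b hb0]
    split_ifs with h1 h2 h3
    · simp [h2.1]
    · simp only [List.filter_cons]
      have : ¬ a ≤ b := fun hab => h2 ⟨hab, h1.1, h1.2.1, h1.2.2⟩
      simp [this]
    · exact absurd ⟨h3.2.1, h3.2.2.1, h3.2.2.2⟩ h1
    · rfl
  -- the chunk below a contributes nothing (a ≤ b fails)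
  have hlo : (PySem.List.pyRange 1 a 1).flatMap (fun b =>
      ((((PySem.List.pyRange b N 1).map (fun c => (b*b + c*c, (b, c)))).filter
          (fun p => p.1 == d*d - a*a)).map (·.2)).filter (fun p => a ≤ p.1)) = [] := by
    rw [List.flatMap_eq_nil_iff]
    intro b hbmem
    rw [PySem.List.mem_pyRange_one] at hbmem
    rw [hpiece b (by omega)]
    rw [if_neg]
    rintro ⟨hab, -⟩
    omega
  -- the chunk from d up contributes nothing (d*d - a*a - b*b < 0 is no square)
  have hhi : (PySem.List.pyRange d N 1).flatMap (fun b =>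
      ((((PySem.List.pyRange b N 1).map (fun c => (b*b + c*c, (b, c)))).filter
          (fun p => p.1 == d*d - a*a)).map (·.2)).filter (fun p => a ≤ p.1)) = [] := by
    rw [List.flatMap_eq_nil_iff]
    intro b hbmem
    rw [PySem.List.mem_pyRange_one] at hbmem
    rw [hpiece b (by omega)]
    rw [if_neg]
    rintro ⟨-, -, -, hsq⟩
    nlinarith [mul_self_nonneg (pyIsqrt (d*d - a*a - b*b))]
  rw [hlo, hhi, List.nil_append, List.append_nil]
  refine List.flatMap_congr (fun b hbmem => ?_)
  rw [PySem.List.mem_pyRange_one] at hbmem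
  rw [hpiece b (by omega)]
  simp only [pqTestA, decide_eq_true_eq]
  have hr0 : 0 ≤ pyIsqrt (d*d - a*a - b*b) := Int.natCast_nonneg _
  split_ifs with h1 h2 h3
  · rfl
  · exact absurd ⟨by nlinarith [h1.2.1], h1.2.2.2, h1.2.1⟩ h2
  · refine absurd ⟨by omega, h3.2.2, by nlinarith, h3.2.1⟩ h1
  · rfl

-- ===== VERDICT (by name: the statement is the Claim_ definition above) =====
theorem pythagorean_quadruples_spec : Claim_equal_pythagorean_quadruples := by
  intro N _
  unfold Spec_pythagorean_quadruples
  rw [pqA_eq, pqB_eq]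
  refine List.flatMap_congr (fun d hd => List.flatMap_congr (fun a ha => ?_))
  rw [PySem.List.mem_pyRange_one] at hd ha
  rw [pq_key N d a ha.1 ha.2 (by omega)]
  rw [List.map_map]
  rfl
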